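-- pv_equiv track=rewrite | github.com/tqa236/codeforces | Round722/D_Kavi_on_Pairing_Duty.py | func
-- ===== SOURCE A (Python) =====
-- MODULO = 998244353
--
-- def func(n):
--     if n == 1:
--         return 1
--     mem = [0 for i in range(int(1e6) + 1)]
--     tot = 0
--     for i in range(1, n + 1):
--         for j in range(i, n + 1, i):
--             mem[j] += 1
--
--         mem[i] += mem[i - 1] + tot
--         mem[i] %= MODULO
--
--         tot += mem[i - 1]
--         tot %= MODULO
--
--     ans = mem[n]
--     ans %= MODULO
--     return ans
-- ===== SOURCE B (Python) =====
-- MODULO = 998244353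
--
-- def func(n):
--     # Sieve divisor counts d[i] once, then a two-term recurrence
--     # f(i) = 2*f(i-1) + d(i) - d(i-1) (mod M), which eliminates the
--     # running prefix-sum accumulator of the original DP.
--     d = [0] * (n + 1)
--     for k in range(1, n + 1):
--         for j in range(k, n + 1, k):
--             d[j] += 1
--     cur = 0
--     for i in range(1, n + 1):
--         cur = (2 * cur + d[i] - d[i - 1]) % MODULO
--     return cur
-- ===== Notes on version B (the rewrite author's own statement) =====
-- stated objective: simpler
-- what changed: B replaces A's interleaved sieve-plus-DP over a fixed 10^6+1-entry array with a prefix-sum accumulator by an n-sized bulk divisor-count sieve followed by the algebraically derived two-term recurrence f(i) = 2*f(i-1) + d(i) - d(i-1) (mod M) kept in a single scalar, eliminating the running total and the huge constant-size allocation.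
import Mathlib
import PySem

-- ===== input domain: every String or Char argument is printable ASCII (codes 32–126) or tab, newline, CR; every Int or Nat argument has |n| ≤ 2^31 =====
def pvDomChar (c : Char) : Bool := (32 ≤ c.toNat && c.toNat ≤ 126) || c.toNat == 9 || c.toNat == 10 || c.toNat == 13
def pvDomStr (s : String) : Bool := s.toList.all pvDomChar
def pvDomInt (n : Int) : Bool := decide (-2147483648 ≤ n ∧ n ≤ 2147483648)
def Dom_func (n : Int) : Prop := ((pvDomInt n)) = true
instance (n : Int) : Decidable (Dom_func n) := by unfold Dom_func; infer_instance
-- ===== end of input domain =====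

-- B replaces A's interleaved sieve/DP over a fixed 10^6-entry array with an
-- n-sized bulk divisor sieve followed by the algebraically simplified two-term
-- recurrence f(i) = 2*f(i-1) + d(i) - d(i-1) (mod M), dropping the running
-- prefix-sum accumulator (objective: simpler).

-- ===== PORT A =====
def MODULO : Int := 998244353

-- Python list indexing/assignment on an Int array; exact for -len ≤ i < len.
-- A write out of bounds is where Python raises IndexError (excluded by Pre_).
def pyAGet (a : Array Int) (i : Int) : Int :=
  if 0 ≤ i then a.getD i.toNat 0 else a.getD ((a.size : Int) + i).toNat 0

def pyASet (a : Array Int) (i : Int) (v : Int) : Array Int :=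
  a.setIfInBounds i.toNat v   -- every written index is ≥ 1 in both programs

-- one outer-loop iteration of A: inner divisor sieve, then the DP update of mem[i] and tot
def stepA (n : Int) (st : Array Int × Int) (i : Int) : Array Int × Int :=
  let mem := (PySem.List.pyRange i (n + 1) i).foldl
    (fun m j => pyASet m j (pyAGet m j + 1)) st.1
  let mem := pyASet mem i (pyAGet mem i + (pyAGet mem (i - 1) + st.2))
  let mem := pyASet mem i (PySem.Int.mod (pyAGet mem i) MODULO)
  let tot := PySem.Int.mod (st.2 + pyAGet mem (i - 1)) MODULO
  (mem, tot)

def func (n : Int) : Int :=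
  if n = 1 then 1
  else
    -- mem = [0 for i in range(int(1e6) + 1)]  (int(1e6) + 1 = 1000001 exactly)
    let st := (PySem.List.pyRange 1 (n + 1) 1).foldl (stepA n) (Array.replicate 1000001 (0 : Int), 0)
    let ans := pyAGet st.1 n
    PySem.Int.mod ans MODULO

-- ===== PORT B =====
def func_alt (n : Int) : Int :=
  let d : Array Int := Array.replicate (n + 1).toNat (0 : Int)   -- [0]*(n+1)
  let d := (PySem.List.pyRange 1 (n + 1) 1).foldl
    (fun d k => (PySem.List.pyRange k (n + 1) k).foldl
      (fun d j => pyASet d j (pyAGet d j + 1)) d) d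
  (PySem.List.pyRange 1 (n + 1) 1).foldl
    (fun cur i => PySem.Int.mod (2 * cur + pyAGet d i - pyAGet d (i - 1)) MODULO) 0

-- ===== PRECONDITION & SPEC =====
-- Pre_ excludes exactly the inputs where A raises IndexError: n > 10^6 (the sieve
-- writes past the fixed 10^6+1 array) and n < -(10^6+1) (the final negative read
-- mem[n] is out of range).
def Pre_func (n : Int) : Prop := -1000001 ≤ n ∧ n ≤ 1000000
instance (n : Int) : Decidable (Pre_func n) := by unfold Pre_func; infer_instance
def pvWitness_func : Int := 6

def Spec_func (n : Int) (out : Int) : Prop := out = func_alt n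
instance (n : Int) (out : Int) : Decidable (Spec_func n out) := by unfold Spec_func; infer_instance

-- ===== CLAIM (what is proved, stated in full; the proofs are below) =====
def Claim_equal_func : Prop := ∀ (n : Int), Dom_func n → Pre_func n → Spec_func n (func n)

-- ===== LEMMAS AND PROOFS =====

-- number of k in 1..i dividing x (partial divisor count)
def pc (i x : Int) : Int := ((PySem.List.pyRange 1 (i + 1) 1).countP (fun k => decide (k ∣ x)) : Int)

-- full divisor count of i
def c (i : Nat) : Int := pc (i : Int) (i : Int)

-- A's DP values: (FU i).1 = final mem[i], (FU i).2 = tot after iteration i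
def FU : Nat → Int × Int
  | 0 => (0, 0)
  | i + 1 =>
    let p := FU i
    (PySem.Int.mod (c (i + 1) + p.1 + p.2) MODULO, PySem.Int.mod (p.2 + p.1) MODULO)

-- B's DP values
def G : Nat → Int
  | 0 => 0
  | i + 1 => PySem.Int.mod (2 * G i + c (i + 1) - c i) MODULO

lemma pc_zero (x : Int) : pc 0 x = 0 := by
  simp [pc, PySem.List.pyRange_one_eq_nil (by omega : (1:Int) ≤ 1)]

lemma pc_succ (i x : Int) (hi : 0 ≤ i) :
    pc (i + 1) x = pc i x + (if (i + 1) ∣ x then 1 else 0) := by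
  unfold pc
  rw [PySem.List.pyRange_one_succ_right (by omega : (1:Int) ≤ i + 1), List.countP_append]
  by_cases h : (i + 1) ∣ x <;> simp [h]

lemma pc_stable (i x : Int) (hx : 1 ≤ x) (hxi : x ≤ i) : pc i x = pc x x := by
  unfold pc
  rw [PySem.List.pyRange_one_append 1 (x + 1) (i + 1) (by omega) (by omega), List.countP_append]
  have h0 : ((PySem.List.pyRange (x + 1) (i + 1) 1).countP (fun k => decide (k ∣ x))) = 0 := by
    rw [List.countP_eq_zero]
    intro k hk
    have hk' := (PySem.List.mem_pyRange_one).1 hk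
    simp only [decide_eq_true_eq]
    intro hdvd
    have := Int.le_of_dvd (by omega) hdvd
    omega
  omega

lemma mod_mod (a : Int) : PySem.Int.mod (PySem.Int.mod a MODULO) MODULO = PySem.Int.mod a MODULO := by
  rw [PySem.Int.mod_eq_emod_of_pos (by decide), PySem.Int.mod_eq_emod_of_pos (by decide)]
  exact Int.emod_emod_of_dvd a dvd_rfl

-- F = G : the two DP recurrences produce the same values
lemma FG : ∀ i : Nat, (FU i).1 = G i ∧ (FU i).1 % MODULO = (c i + (FU i).2) % MODULO := by
  intro i
  induction i with
  | zero => constructor <;> simp [FU, G, c, pc_zero]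
  | succ i ih =>
    obtain ⟨h1, h2⟩ := ih
    have hM : (0:Int) < MODULO := by decide
    constructor
    · show PySem.Int.mod (c (i+1) + (FU i).1 + (FU i).2) MODULO
         = PySem.Int.mod (2 * G i + c (i + 1) - c i) MODULO
      rw [PySem.Int.mod_eq_emod_of_pos hM, PySem.Int.mod_eq_emod_of_pos hM]
      have : ((FU i).1 + (FU i).1) % MODULO = ((c i + (FU i).2) + (FU i).1) % MODULO := by
        rw [Int.add_emod ((FU i).1), Int.add_emod (c i + (FU i).2), h2]
      calc (c (i+1) + (FU i).1 + (FU i).2) % MODULO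
          = ((c (i+1) - c i) + ((c i + (FU i).2) + (FU i).1)) % MODULO := by ring_nf
        _ = ((c (i+1) - c i) + ((FU i).1 + (FU i).1)) % MODULO := by
              rw [Int.add_emod, Int.add_emod ((c (i+1) - c i)) ((FU i).1 + (FU i).1), ← this]
        _ = (2 * G i + c (i + 1) - c i) % MODULO := by rw [h1]; ring_nf
    · show PySem.Int.mod (c (i+1) + (FU i).1 + (FU i).2) MODULO % MODULO
         = (c (i+1) + PySem.Int.mod ((FU i).2 + (FU i).1) MODULO) % MODULO
      rw [PySem.Int.mod_eq_emod_of_pos hM, PySem.Int.mod_eq_emod_of_pos hM,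
          Int.emod_emod_of_dvd _ dvd_rfl, Int.add_emod (c (i+1)), Int.emod_emod_of_dvd _ dvd_rfl,
          ← Int.add_emod]
      ring_nf

-- get/set facts used by the sieve invariant
lemma getD_zero_replicate (m : Nat) (i : Int) : pyAGet (Array.replicate m (0 : Int)) i = 0 := by
  unfold pyAGet
  split <;>
  · rw [Array.getD_eq_getD_getElem?]
    simp only [Array.getElem?_replicate]
    split <;> rfl
lemma getD_set (m : Array Int) (a x : Int) (v : Int) (ha0 : 0 ≤ a) (ha : a < (m.size : Int)) (hx : 0 ≤ x) :
    pyAGet (pyASet m a v) x = if x = a then v else pyAGet m x := by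
  unfold pyAGet pyASet
  rw [if_pos hx, if_pos hx]
  rw [Array.getD_eq_getD_getElem?, Array.getD_eq_getD_getElem?]
  simp only [Array.getElem?_setIfInBounds]
  by_cases hax : a.toNat = x.toNat
  · have hxa : x = a := by omega
    have hlt : a.toNat < m.size := by omega
    have hlt2 : x.toNat < m.size := by omega
    simp [hax, hxa, hlt2]
  · have hxa : ¬ x = a := by omega
    simp [hax, hxa]

-- inner sieve loop: adds 1 exactly at the (distinct, in-range) indices of L
lemma sieve_fold (L : List Int) (hnd : L.Nodup) :
    ∀ (m : Array Int), (∀ j ∈ L, 0 ≤ j ∧ j < (m.size : Int)) →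
      ((L.foldl (fun m j => pyASet m j (pyAGet m j + 1)) m).size = m.size) ∧
      ∀ x : Int, 0 ≤ x →
        pyAGet (L.foldl (fun m j => pyASet m j (pyAGet m j + 1)) m) x
          = pyAGet m x + (if x ∈ L then 1 else 0) := by
  induction L with
  | nil => intro m _; simp
  | cons h t ih =>
    intro m hb
    have hh := hb h (by simp)
    have hnd' : t.Nodup := hnd.of_cons
    have hhm : h ∉ t := by simp [List.nodup_cons] at hnd; exact hnd.1
    have hb' : ∀ j ∈ t, 0 ≤ j ∧ j < ((pyASet m h (pyAGet m h + 1)).size : Int) := by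
      intro j hj
      have : (pyASet m h (pyAGet m h + 1)).size = m.size := Array.size_setIfInBounds
      rw [this]; exact hb j (by simp [hj])
    obtain ⟨ihlen, ihget⟩ := ih hnd' _ hb'
    constructor
    · rw [List.foldl_cons, ihlen]; exact Array.size_setIfInBounds
    · intro x hx
      rw [List.foldl_cons, ihget x hx, getD_set m h x _ hh.1 hh.2 hx]
      by_cases hxh : x = h
      · subst hxh; simp [hhm]
      · simp [hxh]

lemma nodup_pyRange_pos (a b s : Int) (hs : 0 < s) : (PySem.List.pyRange a b s).Nodup := by
  rw [PySem.List.pyRange_of_pos a b hs]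
  refine List.Nodup.map ?_ List.nodup_range
  intro p q h
  simp only at h
  have h2 : s * (p : Int) = s * (q : Int) := by omega
  have := mul_left_cancel₀ (by omega : s ≠ 0) h2
  omega

lemma mem_multiples (i x b : Int) (hi : 0 < i) :
    x ∈ PySem.List.pyRange i b i ↔ i ≤ x ∧ x < b ∧ i ∣ x := by
  rw [PySem.List.mem_pyRange_iff_of_pos hi]
  constructor
  · rintro ⟨h1, h2, h3⟩
    exact ⟨h1, h2, by have := dvd_add h3 (dvd_refl i); simpa using this⟩
  · rintro ⟨h1, h2, h3⟩
    exact ⟨h1, h2, dvd_sub h3 (dvd_refl i)⟩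

-- A's fold state after i outer iterations
def Ast (n : Int) (i : Nat) : Array Int × Int :=
  (PySem.List.pyRange 1 ((i : Int) + 1) 1).foldl (stepA n) (Array.replicate 1000001 (0 : Int), 0)

lemma A_inv (n : Int) (hn : n ≤ 1000000) : ∀ i : Nat, (i : Int) ≤ n →
    (Ast n i).1.size = 1000001 ∧ (Ast n i).2 = (FU i).2 ∧
    ∀ x : Int, 0 ≤ x → pyAGet (Ast n i).1 x =
      (if x ≤ (i : Int) then (FU x.toNat).1 else if x ≤ n then pc (i : Int) x else 0) := by
  intro i
  induction i with
  | zero =>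
    intro _
    refine ⟨?_, ?_, ?_⟩
    · unfold Ast
      simp only [Nat.cast_zero]
      rw [PySem.List.pyRange_one_eq_nil (by omega : (0:Int) + 1 ≤ 1)]
      simp only [List.foldl_nil]
      exact Array.size_replicate
    · unfold Ast
      simp only [Nat.cast_zero]
      rw [PySem.List.pyRange_one_eq_nil (by omega : (0:Int) + 1 ≤ 1)]
      simp only [List.foldl_nil]
      rfl
    · intro x hx
      unfold Ast
      simp only [Nat.cast_zero]
      rw [PySem.List.pyRange_one_eq_nil (by omega : (0:Int) + 1 ≤ 1)]
      simp only [List.foldl_nil]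
      rw [getD_zero_replicate]
      split_ifs with h1 h2
      · have : x.toNat = 0 := by omega
        rw [this]; simp [FU]
      · rw [pc_zero]
      · rfl
  | succ i ih =>
    intro hin
    have hi' : (i : Int) ≤ n := by push_cast at hin ⊢; omega
    obtain ⟨hlen, htot, hget⟩ := ih hi'
    have hsplit : Ast n (i + 1) = stepA n (Ast n i) ((i : Int) + 1) := by
      unfold Ast
      have hc : ((i + 1 : Nat) : Int) + 1 = ((i : Int) + 1) + 1 := by push_cast; ring
      rw [hc, PySem.List.pyRange_one_succ_right (by omega : (1:Int) ≤ (i:Int) + 1),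
          List.foldl_append, List.foldl_cons, List.foldl_nil]
    -- the inner sieve
    have hip : (0 : Int) < (i : Int) + 1 := by omega
    have hnd := nodup_pyRange_pos ((i:Int)+1) (n+1) ((i:Int)+1) hip
    have hb : ∀ j ∈ PySem.List.pyRange ((i:Int)+1) (n+1) ((i:Int)+1),
        0 ≤ j ∧ j < ((Ast n i).1.size : Int) := by
      intro j hj
      obtain ⟨h1, h2, _⟩ := (mem_multiples _ _ _ hip).1 hj
      rw [hlen]; constructor <;> omega
    obtain ⟨slen, sget⟩ := sieve_fold _ hnd (Ast n i).1 hb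
    set m1 := (PySem.List.pyRange ((i:Int)+1) (n+1) ((i:Int)+1)).foldl
      (fun m j => pyASet m j (pyAGet m j + 1)) (Ast n i).1 with hm1
    have hm1len : m1.size = 1000001 := by rw [slen, hlen]
    -- reads from m1
    have hr1 : pyAGet m1 ((i:Int)+1) = c (i + 1) := by
      rw [sget _ (by omega), hget _ (by omega)]
      have hmem : ((i:Int)+1) ∈ PySem.List.pyRange ((i:Int)+1) (n+1) ((i:Int)+1) := by
        rw [mem_multiples _ _ _ hip]; exact ⟨le_refl _, by omega, dvd_refl _⟩
      rw [if_neg (by omega), if_pos (by omega), if_pos hmem]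
      simp only [c]
      have : ((i + 1 : Nat) : Int) = (i : Int) + 1 := by push_cast; ring
      rw [this, pc_succ _ _ (by omega), if_pos (dvd_refl _)]
    have hr2 : pyAGet m1 (i : Int) = (FU i).1 := by
      rw [sget _ (by omega), hget _ (by omega)]
      have hnmem : ((i:Int)) ∉ PySem.List.pyRange ((i:Int)+1) (n+1) ((i:Int)+1) := by
        rw [mem_multiples _ _ _ hip]; rintro ⟨h1, -, -⟩; omega
      rw [if_pos (le_refl _), if_neg hnmem]
      simp
    -- unfold the step
    rw [hsplit]
    simp only [stepA, ← hm1, htot]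
    rw [show ((i:Int) + 1 - 1) = (i : Int) by ring]
    rw [hr1, hr2]
    rw [getD_set m1 _ _ _ (by omega) (by rw [hm1len]; push_cast; omega) (by omega), if_pos rfl]
    have hv : PySem.Int.mod (c (i+1) + ((FU i).1 + (FU i).2)) MODULO = (FU (i+1)).1 := by
      simp [FU]; ring_nf
    rw [hv]
    have hset2 : ∀ x : Int, 0 ≤ x →
        pyAGet (pyASet (pyASet m1 ((i:Int)+1)
            (c (i+1) + ((FU i).1 + (FU i).2))) ((i:Int)+1) ((FU (i+1)).1)) x =
          if x = (i:Int)+1 then (FU (i+1)).1 else pyAGet m1 x := by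
      intro x hx
      rw [getD_set _ _ _ _ (by omega) (by rw [show ∀ (a:Array Int) (i:Int) (v:Int), (pyASet a i v).size = a.size from fun _ _ _ => Array.size_setIfInBounds, hm1len]; push_cast; omega) hx,
          getD_set _ _ _ _ (by omega) (by rw [hm1len]; push_cast; omega) hx]
      split_ifs <;> rfl
    refine ⟨?_, ?_, ?_⟩
    · simp only [pyASet, Array.size_setIfInBounds]; exact hm1len
    · simp only [hset2 (i:Int) (by omega), if_neg (by omega : ¬ ((i:Int) = (i:Int)+1)), hr2]
      simp [FU]
    · intro x hx
      rw [hset2 x hx]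
      by_cases hxe : x = (i:Int)+1
      · rw [if_pos hxe, if_pos (show x ≤ ((i+1:Nat):Int) by push_cast; omega)]
        have hxt : x.toNat = i + 1 := by omega
        rw [hxt]
      · rw [if_neg hxe, sget x hx, hget x hx]
        by_cases hx1 : x ≤ (i:Int)
        · have hnm : x ∉ PySem.List.pyRange ((i:Int)+1) (n+1) ((i:Int)+1) := by
            rw [mem_multiples _ _ _ hip]; rintro ⟨h1, -, -⟩; omega
          rw [if_pos hx1, if_neg hnm, if_pos (show x ≤ ((i+1:Nat):Int) by push_cast; omega)]
          ring
        · have hne1 : ¬ x ≤ ((i+1:Nat):Int) := by push_cast; omega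
          rw [if_neg hx1, if_neg hne1]
          by_cases hx2 : x ≤ n
          · rw [if_pos hx2, if_pos hx2]
            simp only [mem_multiples _ _ _ hip]
            rw [show ((i+1:Nat) : Int) = (i:Int)+1 from by push_cast; ring,
                pc_succ _ _ (by omega : (0:Int) ≤ (i:Int))]
            by_cases hd : ((i:Int)+1) ∣ x
            · rw [if_pos (show (i:Int)+1 ≤ x ∧ x < n+1 ∧ ((i:Int)+1) ∣ x from ⟨by omega, by omega, hd⟩),
                  if_pos hd]
            · rw [if_neg (show ¬((i:Int)+1 ≤ x ∧ x < n+1 ∧ ((i:Int)+1) ∣ x) from by rintro ⟨-, -, h⟩; exact hd h),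
                  if_neg hd]
          · have hnm : x ∉ PySem.List.pyRange ((i:Int)+1) (n+1) ((i:Int)+1) := by
              rw [mem_multiples _ _ _ hip]; rintro ⟨-, h2, -⟩; omega
            rw [if_neg hx2, if_neg hx2, if_neg hnm]
            ring

-- B's sieve state after k outer iterations
def Bd (n : Int) (k : Nat) : Array Int :=
  (PySem.List.pyRange 1 ((k : Int) + 1) 1).foldl
    (fun d kk => (PySem.List.pyRange kk (n + 1) kk).foldl
      (fun d j => pyASet d j (pyAGet d j + 1)) d)
    (Array.replicate (n + 1).toNat (0 : Int))

lemma B_sieve (n : Int) (hn1 : 1 ≤ n) : ∀ k : Nat, (k : Int) ≤ n →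
    (Bd n k).size = (n + 1).toNat ∧
    ∀ x : Int, 0 ≤ x → pyAGet (Bd n k) x =
      (if x = 0 then 0 else if x ≤ n then pc (k : Int) x else 0) := by
  intro k
  induction k with
  | zero =>
    intro _
    refine ⟨?_, ?_⟩
    · unfold Bd
      simp only [Nat.cast_zero]
      rw [PySem.List.pyRange_one_eq_nil (by omega : (0:Int) + 1 ≤ 1)]
      simp only [List.foldl_nil]
      exact Array.size_replicate
    intro x hx
    unfold Bd
    simp only [Nat.cast_zero]
    rw [PySem.List.pyRange_one_eq_nil (by omega : (0:Int) + 1 ≤ 1)]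
    simp only [List.foldl_nil]
    rw [getD_zero_replicate]
    split_ifs with h1 h2
    · rfl
    · rw [pc_zero]
    · rfl
  | succ k ih =>
    intro hkn
    have hk' : (k : Int) ≤ n := by push_cast at hkn ⊢; omega
    obtain ⟨hlen, hget⟩ := ih hk'
    have hsplit : Bd n (k + 1) =
        (PySem.List.pyRange ((k:Int)+1) (n + 1) ((k:Int)+1)).foldl
          (fun d j => pyASet d j (pyAGet d j + 1)) (Bd n k) := by
      unfold Bd
      have hc : ((k + 1 : Nat) : Int) + 1 = ((k : Int) + 1) + 1 := by push_cast; ring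
      rw [hc, PySem.List.pyRange_one_succ_right (by omega : (1:Int) ≤ (k:Int) + 1),
          List.foldl_append, List.foldl_cons, List.foldl_nil]
    have hkp : (0 : Int) < (k : Int) + 1 := by omega
    have hnd := nodup_pyRange_pos ((k:Int)+1) (n+1) ((k:Int)+1) hkp
    have hb : ∀ j ∈ PySem.List.pyRange ((k:Int)+1) (n+1) ((k:Int)+1),
        0 ≤ j ∧ j < ((Bd n k).size : Int) := by
      intro j hj
      obtain ⟨h1, h2, _⟩ := (mem_multiples _ _ _ hkp).1 hj
      rw [hlen]; constructor <;> omega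
    obtain ⟨slen, sget⟩ := sieve_fold _ hnd (Bd n k) hb
    rw [hsplit]
    refine ⟨by rw [slen, hlen], ?_⟩
    intro x hx
    rw [sget x hx, hget x hx]
    by_cases hx0 : x = 0
    · subst hx0
      rw [if_pos rfl, if_pos rfl]
      have : (0:Int) ∉ PySem.List.pyRange ((k:Int)+1) (n+1) ((k:Int)+1) := by
        rw [mem_multiples _ _ _ hkp]; rintro ⟨h1, -, -⟩; omega
      rw [if_neg this]; ring
    · rw [if_neg hx0, if_neg hx0]
      by_cases hx2 : x ≤ n
      · rw [if_pos hx2, if_pos hx2]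
        simp only [mem_multiples _ _ _ hkp]
        rw [show ((k+1:Nat) : Int) = (k:Int)+1 from by push_cast; ring,
            pc_succ _ _ (by omega : (0:Int) ≤ (k:Int))]
        by_cases hd : ((k:Int)+1) ∣ x
        · have hge : (k:Int)+1 ≤ x := Int.le_of_dvd (by omega) hd
          rw [if_pos (show (k:Int)+1 ≤ x ∧ x < n+1 ∧ ((k:Int)+1) ∣ x from ⟨hge, by omega, hd⟩),
              if_pos hd]
        · rw [if_neg (show ¬((k:Int)+1 ≤ x ∧ x < n+1 ∧ ((k:Int)+1) ∣ x) from by rintro ⟨-, -, h⟩; exact hd h),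
              if_neg hd]
      · have hnm : x ∉ PySem.List.pyRange ((k:Int)+1) (n+1) ((k:Int)+1) := by
          rw [mem_multiples _ _ _ hkp]; rintro ⟨-, h2, -⟩; omega
        rw [if_neg hx2, if_neg hx2, if_neg hnm]
        ring

lemma B_dp (n : Int) (d : Array Int)
    (hd : ∀ x : Int, 0 ≤ x → pyAGet d x =
      (if x = 0 then 0 else if x ≤ n then pc n x else 0)) :
    ∀ k : Nat, (k : Int) ≤ n →
      (PySem.List.pyRange 1 ((k : Int) + 1) 1).foldl
        (fun cur i => PySem.Int.mod (2 * cur + pyAGet d i - pyAGet d (i - 1)) MODULO) 0 = G k := by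
  intro k
  induction k with
  | zero =>
    intro _
    simp only [Nat.cast_zero]
    rw [PySem.List.pyRange_one_eq_nil (by omega : (0:Int) + 1 ≤ 1)]
    simp [G]
  | succ k ih =>
    intro hkn
    have hk' : (k : Int) ≤ n := by push_cast at hkn ⊢; omega
    have hc : ((k + 1 : Nat) : Int) + 1 = ((k : Int) + 1) + 1 := by push_cast; ring
    rw [hc, PySem.List.pyRange_one_succ_right (by omega : (1:Int) ≤ (k:Int) + 1),
        List.foldl_append, List.foldl_cons, List.foldl_nil, ih hk']
    rw [show ((k:Int) + 1 - 1) = (k : Int) by ring]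
    rw [hd ((k:Int)+1) (by omega), hd (k:Int) (by omega)]
    rw [if_neg (by omega : ¬ ((k:Int)+1 = 0)), if_pos (by push_cast at hkn ⊢; omega)]
    rw [pc_stable _ _ (by omega) (by push_cast at hkn ⊢; omega)]
    by_cases hk0 : k = 0
    · subst hk0
      simp only [Nat.cast_zero, G]
      simp [c, pc_zero]
    · rw [if_neg (by omega : ¬ ((k:Int) = 0)), if_pos hk']
      rw [pc_stable n (k:Int) (by omega) hk']
      simp only [G, c]
      push_cast
      ring_nf

-- final assembly helpers
lemma func_eq_F (n : Int) (hn2 : 2 ≤ n) (hn : n ≤ 1000000) : func n = (FU n.toNat).1 := by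
  obtain ⟨hlen, htot, hget⟩ := A_inv n hn n.toNat (by omega)
  unfold func
  rw [if_neg (by omega : ¬ n = 1)]
  have hcast : ((n.toNat : Nat) : Int) = n := by omega
  have : (PySem.List.pyRange 1 (n + 1) 1).foldl (stepA n) (Array.replicate 1000001 (0:Int), 0)
      = Ast n n.toNat := by unfold Ast; rw [hcast]
  simp only [this]
  rw [hget n (by omega), if_pos (by omega)]
  obtain ⟨j, hj⟩ : ∃ j, n.toNat = j + 1 := ⟨n.toNat - 1, by omega⟩
  rw [hj]
  have : (FU (j+1)).1 = PySem.Int.mod (c (j + 1) + (FU j).1 + (FU j).2) MODULO := by simp [FU]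
  rw [this, mod_mod]

lemma func_alt_eq_G (n : Int) (hn1 : 1 ≤ n) : func_alt n = G n.toNat := by
  have hcast : ((n.toNat : Nat) : Int) = n := by omega
  obtain ⟨hlen, hget⟩ := B_sieve n hn1 n.toNat (by omega)
  rw [hcast] at hget
  unfold func_alt
  have hd : (PySem.List.pyRange 1 (n + 1) 1).foldl
      (fun d k => (PySem.List.pyRange k (n + 1) k).foldl
        (fun d j => pyASet d j (pyAGet d j + 1)) d)
      (Array.replicate (n + 1).toNat (0:Int)) = Bd n n.toNat := by unfold Bd; rw [hcast]
  simp only [hd]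
  have := B_dp n (Bd n n.toNat) hget n.toNat (by omega)
  rw [hcast] at this
  exact this

-- ===== VERDICT (by name: the statement is the Claim_ definition above) =====
theorem func_spec : Claim_equal_func := by
  unfold Claim_equal_func
  intro n _ hpre
  unfold Spec_func
  obtain ⟨hlo, hhi⟩ := hpre
  by_cases h0 : n ≤ 0
  · unfold func
    rw [if_neg (by omega : ¬ n = 1),
        PySem.List.pyRange_one_eq_nil (by omega : n + 1 ≤ 1)]
    simp only [List.foldl_nil]
    rw [getD_zero_replicate]
    unfold func_alt
    rw [PySem.List.pyRange_one_eq_nil (by omega : n + 1 ≤ 1)]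
    simp only [List.foldl_nil]
    decide
  · by_cases h1 : n = 1
    · subst h1; decide
    · rw [func_eq_F n (by omega) hhi, func_alt_eq_G n (by omega)]
      exact (FG n.toNat).1
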